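-- pv_equiv track=rewrite | github.com/mohit-bags/BERT-Notebooks | July_27_New Training Data/CLASS_BIO_Format_Tagging.py | give_tags
-- ===== SOURCE A (Python) =====
-- def give_tags(manual_tags): #give a list of strings then returns all tags as single & multi words
--     tech_dict = {}
--     for j in manual_tags:
--         if j not in tech_dict:
--             tech_dict[j] = 1
--         else:
--             tech_dict[j] += 1
--     tech_list=[]
--     tech_multi_words=[]
--     for i in tech_dict:
--         if ((' ' in i) == True):
--             tech_multi_words.append(i)
--         else:
--             tech_list.append(i)
--     return tech_list,tech_multi_words
-- ===== SOURCE B (Python) =====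
-- def give_tags(manual_tags):
--     seen = set()
--     tech_list = []
--     tech_multi_words = []
--     for j in manual_tags:
--         if j not in seen:
--             seen.add(j)
--             if ' ' in j:
--                 tech_multi_words.append(j)
--             else:
--                 tech_list.append(j)
--     return tech_list, tech_multi_words
-- ===== Notes on version B (the rewrite author's own statement) =====
-- stated objective: simpler
-- what changed: Replaces A's two-phase pipeline (build a count-dict, then a second loop partitioning its keys) with one fused pass over the input that dedups with a seen-set and classifies each first occurrence immediately, dropping the unused counts.
import Mathlib
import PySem

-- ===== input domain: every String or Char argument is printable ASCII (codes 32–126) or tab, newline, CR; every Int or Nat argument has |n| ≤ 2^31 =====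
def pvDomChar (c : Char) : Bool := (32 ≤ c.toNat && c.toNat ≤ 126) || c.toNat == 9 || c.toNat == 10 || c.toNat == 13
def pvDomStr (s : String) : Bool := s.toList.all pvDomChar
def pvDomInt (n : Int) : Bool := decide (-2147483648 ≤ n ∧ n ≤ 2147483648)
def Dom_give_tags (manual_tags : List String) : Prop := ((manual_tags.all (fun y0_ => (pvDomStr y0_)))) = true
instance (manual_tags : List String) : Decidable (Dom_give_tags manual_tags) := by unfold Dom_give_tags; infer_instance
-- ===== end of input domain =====

-- B fuses A's two loops (count-dict build, then key partition) into one seen-set pass; equivalence is proved below.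

-- ===== PORT A =====
def give_tags (manual_tags : List String) : List String × List String :=
  let tech_dict : PySem.Dict String Int :=
    manual_tags.foldl
      (fun d j => if !(d.contains j) then d.insert j 1 else d.modify j 0 (· + 1))
      PySem.Dict.empty
  let acc :=
    tech_dict.keys.foldl
      (fun (acc : List String × List String) i =>
        if PySem.Str.isIn " " i then (acc.1, acc.2 ++ [i]) else (acc.1 ++ [i], acc.2))
      ([], [])
  (acc.1, acc.2)

-- ===== PORT B =====
def give_tags_alt (manual_tags : List String) : List String × List String :=
  let st :=
    manual_tags.foldl
      (fun (st : PySem.Set String × List String × List String) j =>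
        if st.1.contains j then st
        else (PySem.Set.add st.1 j,
              if PySem.Str.isIn " " j then (st.2.1, st.2.2 ++ [j]) else (st.2.1 ++ [j], st.2.2)))
      (PySem.Set.empty, ([], []))
  st.2

-- ===== PRECONDITION & SPEC =====
def Spec_give_tags (manual_tags : List String) (out : List String × List String) : Prop := out = give_tags_alt manual_tags
instance (manual_tags : List String) (out : List String × List String) : Decidable (Spec_give_tags manual_tags out) := by unfold Spec_give_tags; infer_instance

-- ===== CLAIM (what is proved, stated in full; the proofs are below) =====
def Claim_equal_give_tags : Prop := ∀ (manual_tags : List String), Dom_give_tags manual_tags → Spec_give_tags manual_tags (give_tags manual_tags)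

-- ===== LEMMAS AND PROOFS =====

-- the shared classification step (proof-side abbreviation only)
def pvPartStep (acc : List String × List String) (i : String) : List String × List String :=
  if PySem.Str.isIn " " i then (acc.1, acc.2 ++ [i]) else (acc.1 ++ [i], acc.2)

-- keys of A's count-dict fold are the ordered set-update of the starting keys
theorem pvKeysA (l : List String) (d : PySem.Dict String Int) :
    (l.foldl (fun d j => if !(d.contains j) then d.insert j 1 else d.modify j 0 (· + 1)) d).keys
      = PySem.Set.update d.keys l := by
  induction l generalizing d with
  | nil => simp [PySem.Set.update]
  | cons j l ih =>
      simp only [List.foldl_cons, PySem.Set.update_cons]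
      by_cases hj : d.contains j = true
      · rw [if_neg (by simp [hj]), ih]
        congr 1
        rw [PySem.Dict.keys_modify, PySem.Dict.keys_insert_of_contains d _ hj,
            PySem.Set.add_of_mem ((PySem.Dict.contains_iff_mem_keys d j).mp hj)]
      · have hj' : d.contains j = false := by cases h : d.contains j with
          | true => exact absurd h hj
          | false => rfl
        rw [if_pos (by simp [hj']), ih]
        congr 1
        rw [PySem.Dict.keys_insert_of_not_contains d _ hj',
            PySem.Set.add_of_not_mem (fun h => hj ((PySem.Dict.contains_iff_mem_keys d j).mpr h))]

-- B's fused pass, from a Nodup seen-list carrying its own partition, lands on the partition of the updated seen-list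
theorem pvBmain (l : List String) (s : PySem.Set String) (hs : s.Nodup) :
    l.foldl
      (fun (st : PySem.Set String × List String × List String) j =>
        if st.1.contains j then st
        else (PySem.Set.add st.1 j,
              if PySem.Str.isIn " " j then (st.2.1, st.2.2 ++ [j]) else (st.2.1 ++ [j], st.2.2)))
      (s, s.foldl pvPartStep ([], []))
      = (PySem.Set.update s l, (PySem.Set.update s l).foldl pvPartStep ([], [])) := by
  induction l generalizing s with
  | nil => simp [PySem.Set.update]
  | cons j l ih =>
      simp only [List.foldl_cons, PySem.Set.update_cons]
      by_cases hj : j ∈ s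
      · have hc : PySem.Set.contains s j = true := (PySem.Set.contains_iff s j).mpr hj
        rw [if_pos hc, PySem.Set.add_of_mem hj]
        exact ih s hs
      · have hc : PySem.Set.contains s j = false := by
          cases h : PySem.Set.contains s j with
          | false => rfl
          | true => exact absurd ((PySem.Set.contains_iff s j).mp h) hj
        rw [hc]
        rw [if_neg Bool.false_ne_true, PySem.Set.add_of_not_mem hj]
        have hnd : (s ++ [j]).Nodup := by
          refine List.Nodup.append hs (List.nodup_singleton j) ?_
          intro a ha hb
          rw [List.mem_singleton] at hb
          exact hj (hb ▸ ha)
        have hP : (s ++ [j]).foldl pvPartStep ([], []) = pvPartStep (s.foldl pvPartStep ([], [])) j := by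
          simp [List.foldl_append]
        have := ih (s ++ [j]) hnd
        rw [hP] at this
        simpa [pvPartStep] using this

-- ===== VERDICT (by name: the statement is the Claim_ definition above) =====
theorem give_tags_spec : Claim_equal_give_tags := by
  intro manual_tags _
  unfold Spec_give_tags
  simp only [give_tags, give_tags_alt, PySem.Set.empty]
  have hA := pvKeysA manual_tags PySem.Dict.empty
  have hB := pvBmain manual_tags ([] : PySem.Set String) List.nodup_nil
  simp only [PySem.Dict.keys_empty] at hA
  simp only [List.foldl_nil] at hB
  rw [hA, hB]
  rfl
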